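-- pv_equiv track=rewrite | github.com/Jidetireni/Python_pro | year.py | age_in_days
-- ===== SOURCE A (Python) =====
-- def leap_year(year):
--     if year % 4 == 0:
--         if year % 100 == 0:
--             if year % 400 == 0:
--                 return True
--             return False
--         return True
--     return False
--
-- def find_leap(year_of_birth, age):
--     leap_years= []
--     for year in range(year_of_birth, year_of_birth + age):
--         if leap_year(year):
--             leap_years.append(year)
--     return leap_years
--
-- def age_in_days(age):
--     days_in_year= 365
--     leap_years= find_leap(1, age)
--     total_days= 0
--     while age > 0:
--         total_days += days_in_year
--         if age in leap_years:
--             total_days += 1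
--         age -= 1
--     return  total_days
-- ===== SOURCE B (Python) =====
-- def age_in_days(age):
--     if age <= 0:
--         return 0
--     return 365 * age + age // 4 - age // 100 + age // 400
-- ===== Notes on version B (the rewrite author's own statement) =====
-- stated objective: faster
-- what changed: Replaced the leap-year list built over the whole range plus the quadratic countdown while-loop (linear membership test per year) by a constant-time closed form: days-per-year times age plus the floor-division leap count (zero for non-positive age).
import Mathlib
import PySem

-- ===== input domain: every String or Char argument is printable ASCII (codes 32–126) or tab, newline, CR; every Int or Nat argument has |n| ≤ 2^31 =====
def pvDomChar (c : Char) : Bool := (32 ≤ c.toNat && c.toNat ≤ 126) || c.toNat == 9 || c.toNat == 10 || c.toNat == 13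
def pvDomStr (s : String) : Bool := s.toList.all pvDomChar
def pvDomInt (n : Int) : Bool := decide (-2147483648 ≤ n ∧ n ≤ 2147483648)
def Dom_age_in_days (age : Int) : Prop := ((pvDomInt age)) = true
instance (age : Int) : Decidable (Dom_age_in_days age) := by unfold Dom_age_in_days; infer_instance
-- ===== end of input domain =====

-- B replaces A's leap-year list and quadratic countdown loop by the O(1) closed form
-- 365*age + age//4 - age//100 + age//400 (0 for age ≤ 0).

-- ===== PORT A =====
def pvLeapYear (year : Int) : Bool :=
  if PySem.Int.mod year 4 == 0 then
    if PySem.Int.mod year 100 == 0 then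
      if PySem.Int.mod year 400 == 0 then true else false
    else true
  else false

def pvFindLeap (year_of_birth : Int) (age : Int) : List Int :=
  (PySem.List.pyRange year_of_birth (year_of_birth + age) 1).foldl
    (fun acc year => if pvLeapYear year then acc ++ [year] else acc) []

def pvAgeLoop (age : Int) (leap_years : List Int) (total_days : Int) : Int :=
  if age > 0 then
    pvAgeLoop (age - 1) leap_years
      (total_days + 365 + (if leap_years.contains age then 1 else 0))
  else total_days
termination_by age.toNat
decreasing_by omega

def age_in_days (age : Int) : Int :=
  pvAgeLoop age (pvFindLeap 1 age) 0

-- ===== PORT B =====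
def age_in_days_alt (age : Int) : Int :=
  if age ≤ 0 then 0
  else 365 * age + PySem.Int.floordiv age 4 - PySem.Int.floordiv age 100
       + PySem.Int.floordiv age 400

-- ===== PRECONDITION & SPEC =====
def Spec_age_in_days (age : Int) (out : Int) : Prop := out = age_in_days_alt age
instance (age : Int) (out : Int) : Decidable (Spec_age_in_days age out) := by unfold Spec_age_in_days; infer_instance

-- ===== CLAIM (what is proved, stated in full; the proofs are below) =====
def Claim_equal_age_in_days : Prop := ∀ (age : Int), Dom_age_in_days age → Spec_age_in_days age (age_in_days age)

-- ===== LEMMAS AND PROOFS =====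

-- the leap-year list is a filter of the range
theorem pvFindLeap_eq_filter (yob age : Int) :
    pvFindLeap yob age = (PySem.List.pyRange yob (yob + age) 1).filter pvLeapYear := by
  simpa using PySem.List.foldl_append_if_eq_filter pvLeapYear
    (PySem.List.pyRange yob (yob + age) 1) []

theorem mem_pvFindLeap (A k : Int) :
    k ∈ pvFindLeap 1 A ↔ (1 ≤ k ∧ k < 1 + A ∧ pvLeapYear k = true) := by
  rw [pvFindLeap_eq_filter]
  simp [List.mem_filter, PySem.List.mem_pyRange_one]
  tauto

-- closed-form leap count for the first n years
def pvCnt (n : Nat) : Int := (n : Int) / 4 - (n : Int) / 100 + (n : Int) / 400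

theorem pvCnt_succ (n : Nat) :
    pvCnt (n + 1) = pvCnt n + (if pvLeapYear ((n : Int) + 1) then 1 else 0) := by
  unfold pvCnt pvLeapYear
  rw [PySem.Int.mod_eq_emod_of_pos (by norm_num : (0:Int) < 4),
      PySem.Int.mod_eq_emod_of_pos (by norm_num : (0:Int) < 100),
      PySem.Int.mod_eq_emod_of_pos (by norm_num : (0:Int) < 400)]
  by_cases h1 : ((n : Int) + 1) % 4 = 0 <;>
    by_cases h2 : ((n : Int) + 1) % 100 = 0 <;>
      by_cases h3 : ((n : Int) + 1) % 400 = 0 <;>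
        simp [h1, h2, h3] <;> omega

theorem pvAgeLoop_closed (A : Int) (n : Nat) (t : Int) (hn : (n : Int) ≤ A) :
    pvAgeLoop (n : Int) (pvFindLeap 1 A) t = t + 365 * n + pvCnt n := by
  induction n generalizing t with
  | zero =>
    unfold pvAgeLoop
    simp [pvCnt]
  | succ m ih =>
    rw [pvAgeLoop]
    have hpos : ((m + 1 : Nat) : Int) > 0 := by push_cast; omega
    rw [if_pos hpos]
    have hsub : ((m + 1 : Nat) : Int) - 1 = (m : Int) := by push_cast; omega
    have hn' : (m : Int) + 1 ≤ A := by push_cast at hn; omega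
    have hcast : ((m + 1 : Nat) : Int) = (m : Int) + 1 := by push_cast; ring
    have hmem : (pvFindLeap 1 A).contains ((m + 1 : Nat) : Int)
        = pvLeapYear ((m : Int) + 1) := by
      rw [hcast]
      cases h : pvLeapYear ((m : Int) + 1) <;>
        simp [mem_pvFindLeap, h] <;> omega
    rw [hsub, hmem, ih _ (by omega), pvCnt_succ]
    push_cast
    split_ifs <;> ring

-- ===== VERDICT (by name: the statement is the Claim_ definition above) =====
theorem age_in_days_spec : Claim_equal_age_in_days := by
  intro age _
  unfold Spec_age_in_days age_in_days age_in_days_alt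
  by_cases h : age ≤ 0
  · rw [if_pos h]
    unfold pvAgeLoop
    rw [if_neg (by omega)]
  · rw [if_neg h]
    have hpos : 0 < age := by omega
    have hage : ((age.toNat : Nat) : Int) = age := Int.toNat_of_nonneg (by omega)
    rw [← hage, pvAgeLoop_closed ((age.toNat : Nat) : Int) age.toNat 0 (le_refl _),
        pvCnt,
        PySem.Int.floordiv_eq_ediv_of_pos (by norm_num : (0:Int) < 4),
        PySem.Int.floordiv_eq_ediv_of_pos (by norm_num : (0:Int) < 100),
        PySem.Int.floordiv_eq_ediv_of_pos (by norm_num : (0:Int) < 400)]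
    ring
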